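-- pv_equiv track=rewrite | github.com/Catherine-Chu/TrafficSigOpt | RecoverTiming.py | summ1
-- ===== SOURCE A (Python) =====
-- block = [4, 4, 3, 5, 3, 4, 3]
--
-- minPhase = [[35,35,8,10],[8,35,8,35],[10,35,35],[10,35,10,8,35],[10,35,35],[10,35,10,35],[10,35,35]] # 最小相位时长
--
-- def summ1(i,beg):
--     sum=0
--     for j in range(block[i]):
--         if j<beg or j==1:
--             continue
--         else:
--             sum+=minPhase[i][j]
--     return sum
-- ===== SOURCE B (Python) =====
-- block = [4, 4, 3, 5, 3, 4, 3]
--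
-- minPhase = [[35,35,8,10],[8,35,8,35],[10,35,35],[10,35,10,8,35],[10,35,35],[10,35,10,35],[10,35,35]] # 最小相位时长
--
-- def summ1(i, beg):
--     # slice-sum of all entries from index >= beg, then remove the always-skipped index 1
--     row = minPhase[i]
--     s = sum(row[max(0, beg):block[i]])
--     return s - (row[1] if beg <= 1 else 0)
-- ===== Notes on version B (the rewrite author's own statement) =====
-- stated objective: simpler
-- what changed: Replaced the skip-condition loop over range(block[i]) by a single slice-sum row[max(0,beg):block[i]] plus subtraction of the always-skipped index-1 entry when beg <= 1.
import Mathlib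
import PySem

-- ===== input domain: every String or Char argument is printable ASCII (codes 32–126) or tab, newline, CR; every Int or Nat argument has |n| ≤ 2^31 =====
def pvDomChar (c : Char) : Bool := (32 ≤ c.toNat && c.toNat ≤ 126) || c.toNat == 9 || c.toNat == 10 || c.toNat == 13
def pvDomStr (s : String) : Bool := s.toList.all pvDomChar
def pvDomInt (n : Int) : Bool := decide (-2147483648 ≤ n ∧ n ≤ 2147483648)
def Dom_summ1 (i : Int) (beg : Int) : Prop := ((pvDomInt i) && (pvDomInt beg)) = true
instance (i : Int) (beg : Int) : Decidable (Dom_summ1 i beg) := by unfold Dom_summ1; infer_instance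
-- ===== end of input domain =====

-- B changes the decomposition: slice-sum plus one correction term instead of a skip-condition loop (objective: simpler).

def blockL : List Int := [4, 4, 3, 5, 3, 4, 3]

def minPhaseL : List (List Int) :=
  [[35,35,8,10],[8,35,8,35],[10,35,35],[10,35,10,8,35],[10,35,35],[10,35,10,35],[10,35,35]]

-- ===== PORT A =====
-- loop over range(block[i]); 'continue' when j < beg or j == 1, else add minPhase[i][j]
def summ1 (i : Int) (beg : Int) : Int :=
  let bi := (PySem.List.pyGet? blockL i).getD 0
  let row := (PySem.List.pyGet? minPhaseL i).getD []
  (PySem.List.pyRange 0 bi 1).foldl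
    (fun s j => if j < beg ∨ j = 1 then s else s + (PySem.List.pyGet? row j).getD 0) 0

-- ===== PORT B =====
-- sum(row[max(0,beg):block[i]]) minus row[1] when beg <= 1
def summ1_alt (i : Int) (beg : Int) : Int :=
  let row := (PySem.List.pyGet? minPhaseL i).getD []
  let s := (PySem.List.slice row (some (max 0 beg)) (some ((PySem.List.pyGet? blockL i).getD 0))).sum
  s - (if beg ≤ 1 then (PySem.List.pyGet? row 1).getD 0 else 0)

-- ===== PRECONDITION & SPEC =====
-- A (and B) raise IndexError on block[i] / minPhase[i] when i is outside Python's wraparound range [-7, 6]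
def Pre_summ1 (i : Int) (beg : Int) : Prop := -7 ≤ i ∧ i ≤ 6
instance (i : Int) (beg : Int) : Decidable (Pre_summ1 i beg) := by unfold Pre_summ1; infer_instance
def pvWitness_summ1 : Int × Int := (2, 1)

def Spec_summ1 (i : Int) (beg : Int) (out : Int) : Prop := out = summ1_alt i beg
instance (i : Int) (beg : Int) (out : Int) : Decidable (Spec_summ1 i beg out) := by unfold Spec_summ1; infer_instance

-- ===== CLAIM (what is proved, stated in full; the proofs are below) =====
def Claim_equal_summ1 : Prop := ∀ (i : Int) (beg : Int), Dom_summ1 i beg → Pre_summ1 i beg → Spec_summ1 i beg (summ1 i beg)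

-- ===== LEMMAS AND PROOFS =====

-- ===== VERDICT (by name: the statement is the Claim_ definition above) =====
theorem summ1_spec : Claim_equal_summ1 := by
  intro i beg _ hp
  unfold Spec_summ1
  obtain ⟨h1, h2⟩ := hp
  have hcase : beg ≤ 0 ∨ beg = 1 ∨ beg = 2 ∨ beg = 3 ∨ beg = 4 ∨ 5 ≤ beg := by omega
  rcases hcase with h | h | h | h | h | h
  · have hm : max (0:Int) beg = 0 := by omega
    interval_cases i <;>
      norm_num [summ1, summ1_alt, hm, minPhaseL, blockL, PySem.List.pyRange_one, PySem.List.slice,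
            PySem.List.clampIdx, PySem.List.pyGet?, PySem.List.pyIdx?, List.range_succ, show Int.toNat 0 = 0 from rfl, show Int.toNat 1 = 1 from rfl, show Int.toNat 2 = 2 from rfl, show Int.toNat 3 = 3 from rfl, show Int.toNat 4 = 4 from rfl, show Int.toNat 5 = 5 from rfl, show Int.toNat 6 = 6 from rfl, show Int.toNat 7 = 7 from rfl,
            show ¬((0:Int) < beg) from by omega, show ¬((1:Int) < beg) from by omega,
            show ¬((2:Int) < beg) from by omega, show ¬((3:Int) < beg) from by omega,
            show ¬((4:Int) < beg) from by omega, show beg ≤ (1:Int) from by omega]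
  · subst h; interval_cases i <;> decide
  · subst h; interval_cases i <;> decide
  · subst h; interval_cases i <;> decide
  · subst h; interval_cases i <;> decide
  · have hm : max (0:Int) beg = beg := by omega
    interval_cases i <;>
      norm_num [summ1, summ1_alt, hm, minPhaseL, blockL, PySem.List.pyRange_one, PySem.List.slice,
            PySem.List.clampIdx, PySem.List.pyGet?, PySem.List.pyIdx?, List.range_succ, show Int.toNat 0 = 0 from rfl, show Int.toNat 1 = 1 from rfl, show Int.toNat 2 = 2 from rfl, show Int.toNat 3 = 3 from rfl, show Int.toNat 4 = 4 from rfl, show Int.toNat 5 = 5 from rfl, show Int.toNat 6 = 6 from rfl, show Int.toNat 7 = 7 from rfl,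
            show ((0:Int) < beg) from by omega, show ((1:Int) < beg) from by omega,
            show ((2:Int) < beg) from by omega, show ((3:Int) < beg) from by omega,
            show ((4:Int) < beg) from by omega, show ¬(beg ≤ (1:Int)) from by omega,
            show ¬(beg < (0:Int)) from by omega,
            show min beg.toNat 3 = 3 from by omega, show min beg.toNat 4 = 4 from by omega,
            show min beg.toNat 5 = 5 from by omega]
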